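-- pv_equiv track=rewrite | github.com/pypi-data/pypi-mirror-397 | packages/chloros-sdk/chloros_sdk-1.0.0.tar.gz/chloros_sdk-1.0.0/safe_debug_cleanup.py | safe_remove_console_logs
-- ===== SOURCE A (Python) =====
-- def safe_remove_console_logs(content, keywords):
--     """Safely remove console.log statements containing any of the keywords"""
--     lines = content.split('\n')
--     result = []
--     i = 0
--     removed_count = 0
--
--     while i < len(lines):
--         line = lines[i]
--
--         # Check if this line contains console.log with any of our keywords
--         has_keyword = False
--         if 'console.log' in line:
--             for keyword in keywords:
--                 if keyword in line:
--                     has_keyword = True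
--                     break
--
--         if has_keyword:
--             # This is a console.log we want to remove
--             # Check if it's complete on one line
--             if line.count('(') == line.count(')'):
--                 # Single line - just skip it
--                 removed_count += 1
--                 i += 1
--                 continue
--             else:
--                 # Multi-line - skip until balanced
--                 paren_count = line.count('(') - line.count(')')
--                 removed_count += 1
--                 i += 1
--                 while i < len(lines) and paren_count != 0:
--                     paren_count += lines[i].count('(') - lines[i].count(')')
--                     i += 1
--                 continue
--
--         result.append(line)
--         i += 1
--
--     return '\n'.join(result), removed_count
-- ===== SOURCE B (Python) =====
-- def safe_remove_console_logs(content, keywords):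
--     """Jump-table approach: precompute paren-balance prefix sums and, via a backward
--     hashed pass, for every position the next position with equal prefix sum; the
--     main loop then skips a whole multi-line statement with a single table jump."""
--     lines = content.split('\n')
--     n = len(lines)
--     prefix = [0]
--     for line in lines:
--         prefix.append(prefix[-1] + line.count('(') - line.count(')'))
--     # jump[i] = least j > i with prefix[j] == prefix[i], else n
--     jump = [n] * (n + 1)
--     seen = {}
--     for idx in range(n, -1, -1):
--         jump[idx] = seen.get(prefix[idx], n)
--         seen[prefix[idx]] = idx
--     result = []
--     removed = 0
--     i = 0
--     while i < n:
--         line = lines[i]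
--         if 'console.log' in line and any(k in line for k in keywords):
--             removed += 1
--             i = jump[i]
--         else:
--             result.append(line)
--             i += 1
--     return '\n'.join(result), removed
-- ===== Notes on version B (the rewrite author's own statement) =====
-- stated objective: alternative
-- what changed: B precomputes paren-balance prefix sums per line and builds a next-equal-prefix jump table in one backward hashed pass, so the main loop removes a multi-line console.log statement with a single table jump instead of A's inner while-loop that re-counts parentheses.
import Mathlib
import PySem

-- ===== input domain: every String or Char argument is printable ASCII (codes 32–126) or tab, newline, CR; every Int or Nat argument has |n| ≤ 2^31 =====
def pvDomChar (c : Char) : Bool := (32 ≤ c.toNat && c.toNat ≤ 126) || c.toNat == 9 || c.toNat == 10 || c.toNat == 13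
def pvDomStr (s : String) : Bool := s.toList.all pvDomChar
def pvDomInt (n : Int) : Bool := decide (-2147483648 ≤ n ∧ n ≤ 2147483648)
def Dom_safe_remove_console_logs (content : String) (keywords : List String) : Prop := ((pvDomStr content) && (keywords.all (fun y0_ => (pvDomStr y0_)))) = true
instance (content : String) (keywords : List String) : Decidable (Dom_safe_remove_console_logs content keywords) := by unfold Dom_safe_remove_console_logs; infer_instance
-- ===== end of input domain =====

-- B replaces A's inner skip-while by precomputed paren-balance prefix sums plus a
-- next-equal-prefix jump table built in one backward hashed pass (alternative algorithm, same cost).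

-- line.count('(') - line.count(')')
def pvBal (line : String) : Int :=
  (PySem.Str.count line "(" : Int) - (PySem.Str.count line ")" : Int)

-- ===== PORT A =====
-- the 'has_keyword' computation (for-loop with break = any, guarded by the console.log test)
def pvHasKwA (line : String) (keywords : List String) : Bool :=
  if PySem.Str.isIn "console.log" line then
    keywords.any (fun keyword => PySem.Str.isIn keyword line)
  else false

-- the inner 'while i < len(lines) and paren_count != 0' loop: returns the remaining lines
def pvSkipA (ls : List String) (n : Int) : List String :=
  if n = 0 then ls
  else match ls with
    | [] => []
    | l :: rest => pvSkipA rest (n + pvBal l)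
termination_by ls.length
decreasing_by simp

theorem pvSkipA_length_le (ls : List String) (n : Int) : (pvSkipA ls n).length ≤ ls.length := by
  induction ls generalizing n with
  | nil => unfold pvSkipA; split <;> simp
  | cons l rest ih =>
    unfold pvSkipA
    split
    · simp
    · exact Nat.le_trans (ih _) (by simp)

-- the outer 'while i < len(lines)' loop of A
def pvGoA (keywords : List String) (ls : List String) : List String × Int :=
  match ls with
  | [] => ([], 0)
  | line :: rest =>
    if pvHasKwA line keywords then
      if PySem.Str.count line "(" = PySem.Str.count line ")" then
        let p := pvGoA keywords rest
        (p.1, p.2 + 1)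
      else
        let p := pvGoA keywords (pvSkipA rest (pvBal line))
        (p.1, p.2 + 1)
    else
      let p := pvGoA keywords rest
      (line :: p.1, p.2)
termination_by ls.length
decreasing_by
  · simp
  · exact Nat.lt_succ_of_le (pvSkipA_length_le _ _)
  · simp

def safe_remove_console_logs (content : String) (keywords : List String) : String × Int :=
  let p := pvGoA keywords ((PySem.Str.split? content "\n").getD [])
  (PySem.Str.join "\n" p.1, p.2)

-- ===== PORT B =====
-- prefix = [0]; for line in lines: prefix.append(prefix[-1] + bal(line))
def pvPrefix (q : Int) : List String → List Int
  | [] => [q]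
  | l :: rest => q :: pvPrefix (q + pvBal l) rest

-- the backward 'for idx in range(n, -1, -1)' pass, realised as recursion that works
-- after the recursive call (i.e. right-to-left); k is the index of the head entry.
-- Returns (jump list in ascending index order, the 'seen' dict).
def pvJumpAux (k : Nat) (ps : List Int) (nd : Nat) : List Nat × PySem.Dict Int Nat :=
  match ps with
  | [] => ([], PySem.Dict.mk [])
  | p :: rest =>
    let (js, seen) := pvJumpAux (k + 1) rest nd
    ((PySem.Dict.getD seen p nd) :: js, PySem.Dict.insert seen p k)

-- the main 'while i < n' loop of B; fuel only makes the recursion structural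
-- (the proof shows i strictly increases, so fuel n+1 never runs out)
def pvGoB (lines kws : List String) (jump : List Nat) : Nat → Nat → List String → Int → List String × Int
  | 0, _, res, removed => (res, removed)
  | fuel + 1, i, res, removed =>
    if h : i < lines.length then
      if PySem.Str.isIn "console.log" (lines[i]) && kws.any (fun k => PySem.Str.isIn k (lines[i])) then
        pvGoB lines kws jump fuel (jump.getD i lines.length) res (removed + 1)
      else
        pvGoB lines kws jump fuel (i + 1) (res ++ [lines[i]]) removed
    else (res, removed)

def safe_remove_console_logs_alt (content : String) (keywords : List String) : String × Int :=
  let lines := (PySem.Str.split? content "\n").getD []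
  let n := lines.length
  let jump := (pvJumpAux 0 (pvPrefix 0 lines) n).1
  let r := pvGoB lines keywords jump (n + 1) 0 [] 0
  (PySem.Str.join "\n" r.1, r.2)

-- ===== PRECONDITION & SPEC =====
def Spec_safe_remove_console_logs (content : String) (keywords : List String) (out : String × Int) : Prop := out = safe_remove_console_logs_alt content keywords
instance (content : String) (keywords : List String) (out : String × Int) : Decidable (Spec_safe_remove_console_logs content keywords out) := by unfold Spec_safe_remove_console_logs; infer_instance

-- ===== CLAIM (what is proved, stated in full; the proofs are below) =====
def Claim_equal_safe_remove_console_logs : Prop := ∀ (content : String) (keywords : List String), Dom_safe_remove_console_logs content keywords → Spec_safe_remove_console_logs content keywords (safe_remove_console_logs content keywords)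

-- ===== LEMMAS AND PROOFS =====

-- first index ≥ k (in ps, read with indices from k) holding value v; nd if none
def pvFirstIdx (ps : List Int) (k : Nat) (v : Int) (nd : Nat) : Nat :=
  match ps with
  | [] => nd
  | p :: rest => if p = v then k else pvFirstIdx rest (k + 1) v nd

-- the 'seen' dict of the backward pass answers first-index queries
theorem pvJump_dict (ps : List Int) (k : Nat) (v : Int) (nd : Nat) :
    PySem.Dict.getD (pvJumpAux k ps nd).2 v nd = pvFirstIdx ps k v nd := by
  induction ps generalizing k with
  | nil => simp [pvJumpAux, pvFirstIdx, PySem.Dict.getD, PySem.Dict.get?]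
  | cons p rest ih =>
    simp only [pvJumpAux, pvFirstIdx]
    rw [PySem.Dict.getD_insert]
    by_cases h : p = v
    · simp [h]
    · simp [h, Ne.symm h, ih]

-- the first index with equal prefix value is exactly where A's skip loop lands
theorem pvFirst_skip (ls : List String) (k : Nat) (q c : Int) :
    let j := pvFirstIdx (pvPrefix q ls) k (q - c) (k + ls.length)
    k ≤ j ∧ j ≤ k + ls.length ∧ pvSkipA ls c = List.drop (j - k) ls := by
  induction ls generalizing k q c with
  | nil =>
    simp only [pvPrefix, pvFirstIdx, List.length_nil, Nat.add_zero]
    constructor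
    · split <;> simp
    constructor
    · split <;> simp
    · unfold pvSkipA; split <;> simp
  | cons l rest ih =>
    simp only [pvPrefix, pvFirstIdx, List.length_cons]
    by_cases hc : c = 0
    · have : q = q - c := by omega
      simp only [if_pos this]
      refine ⟨le_refl _, by omega, ?_⟩
      rw [pvSkipA, if_pos hc]; simp
    · have hne : ¬ (q = q - c) := by omega
      rw [if_neg hne]
      have heq : q - c = (q + pvBal l) - (c + pvBal l) := by ring
      have := ih (k + 1) (q + pvBal l) (c + pvBal l)
      rw [← heq] at this
      have hlen : k + 1 + rest.length = k + (rest.length + 1) := by omega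
      rw [hlen] at this
      obtain ⟨h1, h2, h3⟩ := this
      refine ⟨by omega, by omega, ?_⟩
      rw [pvSkipA, if_neg hc, h3]
      rw [show pvFirstIdx (pvPrefix (q + pvBal l) rest) (k + 1) (q - c) (k + (rest.length + 1)) - k
            = (pvFirstIdx (pvPrefix (q + pvBal l) rest) (k + 1) (q - c) (k + (rest.length + 1)) - (k + 1)) + 1
          from by omega]
      simp

-- jump[i] jumps exactly past the statement that A's skip loop skips
theorem pvJump_spec (ls : List String) (k : Nat) (q : Int) (nd : Nat)
    (hnd : nd = k + ls.length) (i : Nat) (h : i < ls.length) :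
    ∃ j, ((pvJumpAux k (pvPrefix q ls) nd).1)[i]? = some j ∧ k + i < j ∧ j ≤ nd ∧
      List.drop (j - k) ls = pvSkipA (List.drop (i + 1) ls) (pvBal (ls[i]'h)) := by
  induction ls generalizing k q i with
  | nil => exact absurd h (by simp)
  | cons l rest ih =>
    match i with
    | 0 =>
      refine ⟨PySem.Dict.getD (pvJumpAux (k + 1) (pvPrefix (q + pvBal l) rest) nd).2 q nd, ?_, ?_⟩
      · simp [pvPrefix, pvJumpAux]
      · rw [pvJump_dict]
        have hnd' : nd = (k + 1) + rest.length := by simp at hnd; omega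
        have := pvFirst_skip rest (k + 1) (q + pvBal l) (pvBal l)
        rw [show (q + pvBal l) - pvBal l = q from by ring, ← hnd'] at this
        obtain ⟨h1, h2, h3⟩ := this
        refine ⟨by omega, h2, ?_⟩
        simp only [List.drop_succ_cons, List.drop_zero, List.getElem_cons_zero]
        rw [show pvFirstIdx (pvPrefix (q + pvBal l) rest) (k + 1) q nd - k
              = (pvFirstIdx (pvPrefix (q + pvBal l) rest) (k + 1) q nd - (k + 1)) + 1
            from by omega]
        simp [h3]
    | i + 1 =>
      have h' : i < rest.length := by simpa using h
      have hnd' : nd = (k + 1) + rest.length := by simp at hnd; omega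
      obtain ⟨j, hj, hlt, hle, hdrop⟩ := ih (k + 1) (q + pvBal l) hnd' i h'
      refine ⟨j, ?_, by omega, hle, ?_⟩
      · simpa [pvPrefix, pvJumpAux] using hj
      · simp only [List.drop_succ_cons, List.getElem_cons_succ]
        rw [show j - k = (j - (k + 1)) + 1 from by omega]
        simpa using hdrop

-- B's jump-driven main loop computes A's outer loop
theorem pvGoB_eq (lines kws : List String) (fuel i : Nat) (res : List String) (removed : Int)
    (hf : lines.length - i < fuel) :
    pvGoB lines kws (pvJumpAux 0 (pvPrefix 0 lines) lines.length).1 fuel i res removed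
      = (res ++ (pvGoA kws (List.drop i lines)).1, removed + (pvGoA kws (List.drop i lines)).2) := by
  induction fuel generalizing i res removed with
  | zero => omega
  | succ fuel ih =>
    rw [pvGoB]
    by_cases h : i < lines.length
    · rw [dif_pos h]
      have hdrop := List.drop_eq_getElem_cons h
      have hkw : (PySem.Str.isIn "console.log" lines[i]
          && kws.any (fun k => PySem.Str.isIn k lines[i])) = pvHasKwA lines[i] kws := by
        unfold pvHasKwA; cases PySem.Str.isIn "console.log" lines[i] <;> simp
      rw [hkw]
      by_cases hk : pvHasKwA lines[i] kws = true
      · rw [if_pos hk]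
        obtain ⟨j, hj, hlt, hle, hdropj⟩ :=
          pvJump_spec lines 0 0 lines.length (by omega) i h
        have hgetD : (pvJumpAux 0 (pvPrefix 0 lines) lines.length).1.getD i lines.length = j := by
          simp [List.getD, hj]
        rw [hgetD]
        rw [ih j res (removed + 1) (by omega)]
        have hA : pvGoA kws (List.drop i lines)
            = ((pvGoA kws (List.drop j lines)).1, (pvGoA kws (List.drop j lines)).2 + 1) := by
          rw [hdrop, pvGoA]
          rw [if_pos hk]
          by_cases hb : PySem.Str.count lines[i] "(" = PySem.Str.count lines[i] ")"
          · rw [if_pos hb]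
            have hb0 : pvBal lines[i] = 0 := by unfold pvBal; omega
            have : pvSkipA (List.drop (i + 1) lines) (pvBal lines[i]) = List.drop (i + 1) lines := by
              rw [pvSkipA.eq_def, if_pos hb0]
            rw [show j - 0 = j from by omega] at hdropj
            rw [this] at hdropj
            rw [hdropj]
          · rw [if_neg hb]
            rw [show j - 0 = j from by omega] at hdropj
            rw [hdropj]
        rw [hA]
        simp only [Prod.mk.injEq]
        exact ⟨trivial, by ring⟩
      · rw [if_neg hk]
        rw [ih (i + 1) (res ++ [lines[i]]) removed (by omega)]
        have hA : pvGoA kws (List.drop i lines)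
            = (lines[i] :: (pvGoA kws (List.drop (i + 1) lines)).1,
               (pvGoA kws (List.drop (i + 1) lines)).2) := by
          rw [hdrop, pvGoA, if_neg hk]
        rw [hA]
        simp
    · rw [dif_neg h]
      rw [List.drop_eq_nil_of_le (by omega)]
      simp [pvGoA]

-- ===== VERDICT (by name: the statement is the Claim_ definition above) =====
theorem safe_remove_console_logs_spec : Claim_equal_safe_remove_console_logs := by
  intro content keywords _
  unfold Spec_safe_remove_console_logs safe_remove_console_logs safe_remove_console_logs_alt
  have h := pvGoB_eq ((PySem.Str.split? content "\n").getD []) keywords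
    (((PySem.Str.split? content "\n").getD []).length + 1) 0 [] 0 (by omega)
  simp only [List.drop_zero, List.nil_append] at h
  simp [h]
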